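-- pv_equiv track=rewrite | github.com/sonhung2007/100-Bai | 100 bai/Bai 72.py | tim_chuoi_voi_vi_tri_in_hoa_lon_nhat
-- ===== SOURCE A (Python) =====
-- def tim_chuoi_voi_vi_tri_in_hoa_lon_nhat(L):
--     chuoi_max = None
--     vi_tri_in_hoa_max = -1
--     for chuoi in L:
--         for i, ky_tu in enumerate(chuoi):
--             if ky_tu.isupper() and i > vi_tri_in_hoa_max:
--                 vi_tri_in_hoa_max = i
--                 chuoi_max = chuoi
--     return chuoi_max, vi_tri_in_hoa_max
-- ===== SOURCE B (Python) =====
-- def tim_chuoi_voi_vi_tri_in_hoa_lon_nhat(L):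
--     chuoi_max = None
--     vi_tri_in_hoa_max = -1
--     for chuoi in L:
--         pos = -1
--         for i in range(len(chuoi) - 1, -1, -1):
--             if chuoi[i].isupper():
--                 pos = i
--                 break
--         if pos > vi_tri_in_hoa_max:
--             vi_tri_in_hoa_max = pos
--             chuoi_max = chuoi
--     return chuoi_max, vi_tri_in_hoa_max
-- ===== Notes on version B (the rewrite author's own statement) =====
-- stated objective: alternative
-- what changed: Two-stage decomposition: per string, scan from the RIGHT and stop at the first uppercase char (its rightmost uppercase index), then a separate selection step keeps the string with the strictly largest index; A instead scans every string fully left-to-right, threading the global maximum through the inner loop.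
import Mathlib
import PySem

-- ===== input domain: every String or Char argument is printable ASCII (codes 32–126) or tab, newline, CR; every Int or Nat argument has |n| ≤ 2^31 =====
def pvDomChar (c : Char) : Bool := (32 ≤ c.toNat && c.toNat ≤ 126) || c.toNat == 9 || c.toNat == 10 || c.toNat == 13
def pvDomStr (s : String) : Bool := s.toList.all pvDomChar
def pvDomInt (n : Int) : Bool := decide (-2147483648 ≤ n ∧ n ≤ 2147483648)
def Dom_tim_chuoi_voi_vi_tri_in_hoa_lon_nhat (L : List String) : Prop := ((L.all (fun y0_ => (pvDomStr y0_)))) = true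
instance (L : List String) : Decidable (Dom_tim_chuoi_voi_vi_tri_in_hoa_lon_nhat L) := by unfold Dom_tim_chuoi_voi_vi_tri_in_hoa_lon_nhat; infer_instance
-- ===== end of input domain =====

-- B decomposes the task: per string, scan from the right stopping at the first uppercase
-- char (= rightmost uppercase index), then a separate selection loop (objective: alternative).

-- ===== PORT A =====
-- A: one nested loop, enumerate left-to-right, global maximum threaded through the inner loop.
def tim_chuoi_voi_vi_tri_in_hoa_lon_nhat (L : List String) : Option String × Int :=
  L.foldl (fun st chuoi =>
    (PySem.List.enumerate chuoi.toList).foldl (fun st p =>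
      if PySem.Chars.isupper p.2 && decide (p.1 > st.2) then (some chuoi, p.1) else st) st)
    (none, -1)

-- ===== PORT B =====
-- Source B's inner loop: for i in range(len-1, -1, -1): if s[i].isupper(): pos = i; break
-- ported as structural recursion on the reversed character list, index counting down.
def pvRightScan (rs : List Char) (i : Int) : Int :=
  match rs with
  | [] => -1
  | c :: rest => if PySem.Chars.isupper c then i else pvRightScan rest (i - 1)

def tim_chuoi_voi_vi_tri_in_hoa_lon_nhat_alt (L : List String) : Option String × Int :=
  L.foldl (fun st chuoi =>
    let pos := pvRightScan chuoi.toList.reverse ((chuoi.toList.length : Int) - 1)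
    if pos > st.2 then (some chuoi, pos) else st)
    (none, -1)

-- ===== PRECONDITION & SPEC =====
def Spec_tim_chuoi_voi_vi_tri_in_hoa_lon_nhat (L : List String) (out : Option String × Int) : Prop := out = tim_chuoi_voi_vi_tri_in_hoa_lon_nhat_alt L
instance (L : List String) (out : Option String × Int) : Decidable (Spec_tim_chuoi_voi_vi_tri_in_hoa_lon_nhat L out) := by unfold Spec_tim_chuoi_voi_vi_tri_in_hoa_lon_nhat; infer_instance

-- ===== CLAIM (what is proved, stated in full; the proofs are below) =====
def Claim_equal_tim_chuoi_voi_vi_tri_in_hoa_lon_nhat : Prop := ∀ (L : List String), Dom_tim_chuoi_voi_vi_tri_in_hoa_lon_nhat L → Spec_tim_chuoi_voi_vi_tri_in_hoa_lon_nhat L (tim_chuoi_voi_vi_tri_in_hoa_lon_nhat L)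

-- ===== LEMMAS AND PROOFS =====

-- rightmost uppercase index of cs, indices starting at k; -1 if none
def pvMaxU (cs : List Char) (k : Int) : Int :=
  match cs with
  | [] => -1
  | c :: rest =>
    let r := pvMaxU rest (k + 1)
    if r ≥ k + 1 then r else if PySem.Chars.isupper c then k else -1

theorem pvMaxU_range (cs : List Char) (k : Int) : pvMaxU cs k = -1 ∨ pvMaxU cs k ≥ k := by
  induction cs generalizing k with
  | nil => left; rfl
  | cons c rest ih =>
      simp only [pvMaxU]
      rcases ih (k + 1) with h | h <;> split_ifs <;> omega

-- A's inner enumerate-fold from state (cm, vm) with vm ≥ -1 is a pure selection on pvMaxU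
theorem innerA_eq (s : String) (cs : List Char) (k : Int) (cm : Option String) (vm : Int)
    (hv : vm ≥ -1) :
    (PySem.List.enumerate cs k).foldl (fun st p =>
        if PySem.Chars.isupper p.2 && decide (p.1 > st.2) then (some s, p.1) else st) (cm, vm)
      = if pvMaxU cs k > vm then (some s, pvMaxU cs k) else (cm, vm) := by
  induction cs generalizing k cm vm with
  | nil => simp only [PySem.List.enumerate_nil, List.foldl_nil, pvMaxU]; rw [if_neg (by omega)]
  | cons c rest ih =>
      rw [PySem.List.enumerate_cons, List.foldl_cons]
      have hstep : (if PySem.Chars.isupper (k, c).2 && decide ((k, c).1 > (cm, vm).2)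
            then (some s, (k, c).1) else (cm, vm))
          = if PySem.Chars.isupper c ∧ k > vm then (some s, k) else (cm, vm) := by
        by_cases h : PySem.Chars.isupper c ∧ k > vm <;> simp_all
      rw [hstep]
      by_cases h : PySem.Chars.isupper c ∧ k > vm
      · rw [if_pos h, ih _ _ _ (by omega)]
        simp only [pvMaxU, h.1, if_true]
        rcases pvMaxU_range rest (k + 1) with hr | hr <;> split_ifs <;>
          first
          | rfl
          | (exfalso; omega)
          | (congr 1 <;> first | rfl | omega)
      · rw [if_neg h, ih _ _ _ hv]
        simp only [pvMaxU]
        by_cases hu : PySem.Chars.isupper c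
        · have hk2 : k ≤ vm := by by_contra hc; exact h ⟨hu, by omega⟩
          rcases pvMaxU_range rest (k + 1) with hr | hr <;>
            simp only [hu, if_true] <;> split_ifs <;>
            first
            | rfl
            | (exfalso; omega)
            | (congr 1 <;> first | rfl | omega)
        · rcases pvMaxU_range rest (k + 1) with hr | hr <;>
            simp only [hu, if_false, Bool.false_eq_true] <;> split_ifs <;>
            first
            | rfl
            | (exfalso; omega)
            | (congr 1 <;> first | rfl | omega)

-- pvMaxU of a snoc: the last character dominates when uppercase
theorem pvMaxU_snoc (ys : List Char) (c : Char) (j : Int) (hj : 0 ≤ j) :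
    pvMaxU (ys ++ [c]) j
      = if PySem.Chars.isupper c then j + (ys.length : Int) else pvMaxU ys j := by
  induction ys generalizing j with
  | nil =>
      simp only [List.nil_append, pvMaxU, List.length_nil]
      split_ifs <;> push_cast <;> omega
  | cons y t iht =>
      have h1 := iht (j + 1) (by omega)
      simp only [List.cons_append, pvMaxU, h1, List.length_cons]
      rcases pvMaxU_range t (j + 1) with h | h <;> split_ifs <;> omega

-- B's right-to-left scan computes the rightmost uppercase index
theorem rightScan_eq (cs : List Char) (k : Int) (hk : 0 ≤ k) :
    pvRightScan cs.reverse (k + (cs.length : Int) - 1) = pvMaxU cs k := by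
  induction cs using List.reverseRecOn generalizing k with
  | nil => simp [pvRightScan, pvMaxU]
  | append_singleton ys c ih =>
      have hrev : (ys ++ [c]).reverse = c :: ys.reverse := by simp
      rw [hrev, pvMaxU_snoc ys c k hk]
      simp only [pvRightScan]
      have hlen : (((ys ++ [c]).length : Int)) = (ys.length : Int) + 1 := by
        simp
      have harg : k + ((ys ++ [c]).length : Int) - 1 - 1 = k + (ys.length : Int) - 1 := by omega
      by_cases hu : PySem.Chars.isupper c
      · simp only [if_pos hu]; omega
      · rw [if_neg hu, if_neg hu, harg, ih k hk]

-- the two outer folds agree from any state with second component ≥ -1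
theorem outer_eq (L : List String) (cm : Option String) (vm : Int) (hv : vm ≥ -1) :
    L.foldl (fun st chuoi =>
      (PySem.List.enumerate chuoi.toList).foldl (fun st p =>
        if PySem.Chars.isupper p.2 && decide (p.1 > st.2) then (some chuoi, p.1) else st) st)
      (cm, vm)
    = L.foldl (fun st chuoi =>
        let pos := pvRightScan chuoi.toList.reverse ((chuoi.toList.length : Int) - 1)
        if pos > st.2 then (some chuoi, pos) else st) (cm, vm) := by
  induction L generalizing cm vm with
  | nil => rfl
  | cons s rest ih =>
      simp only [List.foldl_cons]
      have h0 : ((s.toList.length : Int) - 1) = 0 + (s.toList.length : Int) - 1 := by ring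
      rw [innerA_eq s s.toList 0 cm vm hv, h0, rightScan_eq s.toList 0 (by omega)]
      rcases pvMaxU_range s.toList 0 with h | h <;> split_ifs with hgt <;>
        exact ih _ _ (by omega)

-- ===== VERDICT (by name: the statement is the Claim_ definition above) =====
theorem tim_chuoi_voi_vi_tri_in_hoa_lon_nhat_spec : Claim_equal_tim_chuoi_voi_vi_tri_in_hoa_lon_nhat := by
  intro L _
  show _ = _
  unfold tim_chuoi_voi_vi_tri_in_hoa_lon_nhat tim_chuoi_voi_vi_tri_in_hoa_lon_nhat_alt
  exact outer_eq L none (-1) (by omega)
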